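-- pv_equiv track=rewrite | github.com/MrBrantCode/unitest_baseline | mut_generate/mist_train_taco/taco_8940/solution.py | calculate_possible_strings
-- ===== SOURCE A (Python) =====
-- def f3(n):
--     a = b = c = 0
--     for _ in range(n):
--         (a, b, c) = ((a + b + c + 1) % 1000000007, a, b)
--     return a
--
-- def f5(n):
--     a = b = c = d = e = 0
--     for _ in range(n):
--         (a, b, c, d, e) = ((a + b + c + d + e + 1) % 1000000007, a, b, c, d)
--     return a
--
-- def calculate_possible_strings(input_string):
--     ans = 1
--     num = '_'
--     cnt = 1
--
--     for n in input_string + '_':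
--         if n == num:
--             cnt += 1
--         else:
--             if num in '80':
--                 ans = ans * f3(cnt) % 1000000007
--             else:
--                 ans = ans * f5(cnt) % 1000000007
--             num = n
--             cnt = 1
--
--     return ans
-- ===== SOURCE B (Python) =====
-- def calculate_possible_strings(input_string):
--     # Single streaming pass: instead of re-running an f3/f5 helper loop at each
--     # run boundary, both linear-recurrence states are advanced incrementally per
--     # character, so the helper inner loops disappear.
--     MOD = 1000000007
--     ans = 1
--     prev = '_'
--     t = (1, 0, 0)            # tribonacci(+1) state for the current run length
--     p = (1, 0, 0, 0, 0)      # pentanacci(+1) state for the current run length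
--     for c in input_string + '_':
--         if c == prev:
--             t = ((t[0] + t[1] + t[2] + 1) % MOD, t[0], t[1])
--             p = ((p[0] + p[1] + p[2] + p[3] + p[4] + 1) % MOD, p[0], p[1], p[2], p[3])
--         else:
--             ans = ans * (t[0] if prev in '80' else p[0]) % MOD
--             prev = c
--             t = (1, 0, 0)
--             p = (1, 0, 0, 0, 0)
--     return ans
-- ===== Notes on version B (the rewrite author's own statement) =====
-- stated objective: alternative
-- what changed: B replaces A's run-boundary calls to the f3/f5 helper loops by a single streaming pass that advances both linear-recurrence states incrementally per character, so the helper inner loops disappear.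
import Mathlib
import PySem

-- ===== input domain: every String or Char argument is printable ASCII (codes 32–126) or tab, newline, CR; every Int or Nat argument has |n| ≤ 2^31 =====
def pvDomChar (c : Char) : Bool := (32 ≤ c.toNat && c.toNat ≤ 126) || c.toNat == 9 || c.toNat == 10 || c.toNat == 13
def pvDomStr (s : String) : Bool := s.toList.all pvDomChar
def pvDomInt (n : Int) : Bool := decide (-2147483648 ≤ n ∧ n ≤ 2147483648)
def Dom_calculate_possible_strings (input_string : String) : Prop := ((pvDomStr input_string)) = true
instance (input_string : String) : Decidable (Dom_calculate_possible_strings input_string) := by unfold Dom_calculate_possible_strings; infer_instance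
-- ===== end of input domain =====

-- B replaces A's run-boundary calls to the f3/f5 helper loops by a single streaming pass
-- that advances both linear-recurrence states incrementally per character (alternative, same O(n)).

-- ===== PORT A =====
-- f3: a = b = c = 0; n times (a,b,c) = ((a+b+c+1) % 1000000007, a, b); return a
def pvF3 (n : Int) : Int :=
  ((List.range n.toNat).foldl
    (fun (s : Int × Int × Int) _ =>
      (PySem.Int.mod (s.1 + s.2.1 + s.2.2 + 1) 1000000007, s.1, s.2.1))
    (0, 0, 0)).1

-- f5: five-term analogue
def pvF5 (n : Int) : Int :=
  ((List.range n.toNat).foldl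
    (fun (s : Int × Int × Int × Int × Int) _ =>
      (PySem.Int.mod (s.1 + s.2.1 + s.2.2.1 + s.2.2.2.1 + s.2.2.2.2 + 1) 1000000007,
       s.1, s.2.1, s.2.2.1, s.2.2.2.1))
    (0, 0, 0, 0, 0)).1

-- main loop of A over input_string + '_' with state (ans, num, cnt); 'num in "80"' is num = '8' or num = '0'
def pvStepA (st : Int × Char × Int) (n : Char) : Int × Char × Int :=
  if n == st.2.1 then (st.1, st.2.1, st.2.2 + 1)
  else
    (PySem.Int.mod (st.1 * (if st.2.1 == '8' || st.2.1 == '0' then pvF3 st.2.2 else pvF5 st.2.2)) 1000000007,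
     n, 1)

def calculate_possible_strings (input_string : String) : Int :=
  ((input_string.toList ++ ['_']).foldl pvStepA (1, '_', 1)).1

-- ===== PORT B =====
-- one fold, state (ans, prev, tribonacci state t, pentanacci state p); no helper loops
def pvStepB (st : Int × Char × (Int × Int × Int) × (Int × Int × Int × Int × Int)) (c : Char) :
    Int × Char × (Int × Int × Int) × (Int × Int × Int × Int × Int) :=
  let ans := st.1
  let prev := st.2.1
  let t := st.2.2.1
  let p := st.2.2.2
  if c == prev then
    (ans, prev,
     (PySem.Int.mod (t.1 + t.2.1 + t.2.2 + 1) 1000000007, t.1, t.2.1),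
     (PySem.Int.mod (p.1 + p.2.1 + p.2.2.1 + p.2.2.2.1 + p.2.2.2.2 + 1) 1000000007,
      p.1, p.2.1, p.2.2.1, p.2.2.2.1))
  else
    (PySem.Int.mod (ans * (if prev == '8' || prev == '0' then t.1 else p.1)) 1000000007,
     c, (1, 0, 0), (1, 0, 0, 0, 0))

def calculate_possible_strings_alt (input_string : String) : Int :=
  ((input_string.toList ++ ['_']).foldl pvStepB (1, '_', (1, 0, 0), (1, 0, 0, 0, 0))).1

-- ===== PRECONDITION & SPEC =====
def Spec_calculate_possible_strings (input_string : String) (out : Int) : Prop := out = calculate_possible_strings_alt input_string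
instance (input_string : String) (out : Int) : Decidable (Spec_calculate_possible_strings input_string out) := by unfold Spec_calculate_possible_strings; infer_instance

-- ===== CLAIM (what is proved, stated in full; the proofs are below) =====
def Claim_equal_calculate_possible_strings : Prop := ∀ (input_string : String), Dom_calculate_possible_strings input_string → Spec_calculate_possible_strings input_string (calculate_possible_strings input_string)

-- ===== LEMMAS AND PROOFS =====

-- the tribonacci / pentanacci states after m iterations (A's f3/f5 loop states)
def pvT (m : Nat) : Int × Int × Int :=
  (List.range m).foldl
    (fun s _ => (PySem.Int.mod (s.1 + s.2.1 + s.2.2 + 1) 1000000007, s.1, s.2.1)) (0, 0, 0)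

def pvP (m : Nat) : Int × Int × Int × Int × Int :=
  (List.range m).foldl
    (fun s _ =>
      (PySem.Int.mod (s.1 + s.2.1 + s.2.2.1 + s.2.2.2.1 + s.2.2.2.2 + 1) 1000000007,
       s.1, s.2.1, s.2.2.1, s.2.2.2.1)) (0, 0, 0, 0, 0)

lemma pvT_succ (m : Nat) :
    pvT (m + 1) = (PySem.Int.mod ((pvT m).1 + (pvT m).2.1 + (pvT m).2.2 + 1) 1000000007,
                   (pvT m).1, (pvT m).2.1) := by
  simp [pvT, List.range_succ]

lemma pvP_succ (m : Nat) :
    pvP (m + 1) = (PySem.Int.mod ((pvP m).1 + (pvP m).2.1 + (pvP m).2.2.1 + (pvP m).2.2.2.1 + (pvP m).2.2.2.2 + 1) 1000000007,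
                   (pvP m).1, (pvP m).2.1, (pvP m).2.2.1, (pvP m).2.2.2.1) := by
  simp [pvP, List.range_succ]

lemma pvF3_eq (n : Int) : pvF3 n = (pvT n.toNat).1 := rfl
lemma pvF5_eq (n : Int) : pvF5 n = (pvP n.toNat).1 := rfl

lemma pvT_one : pvT 1 = (1, 0, 0) := by decide
lemma pvP_one : pvP 1 = (1, 0, 0, 0, 0) := by decide

-- main loop invariant: B's recurrence states track A's run counter
lemma pv_loop_agree (l : List Char) (ans : Int) (num : Char) (cnt : Int) (h : 1 ≤ cnt) :
    (l.foldl pvStepB (ans, num, pvT cnt.toNat, pvP cnt.toNat)).1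
      = (l.foldl pvStepA (ans, num, cnt)).1 := by
  induction l generalizing ans num cnt with
  | nil => simp
  | cons c tl ih =>
    by_cases hc : c == num
    · have hn : (cnt + 1).toNat = cnt.toNat + 1 := by omega
      simp only [List.foldl_cons, pvStepA, pvStepB, hc, if_pos]
      rw [show (PySem.Int.mod ((pvT cnt.toNat).1 + (pvT cnt.toNat).2.1 + (pvT cnt.toNat).2.2 + 1) 1000000007,
            (pvT cnt.toNat).1, (pvT cnt.toNat).2.1) = pvT (cnt + 1).toNat by rw [hn, pvT_succ],
          show (PySem.Int.mod ((pvP cnt.toNat).1 + (pvP cnt.toNat).2.1 + (pvP cnt.toNat).2.2.1 + (pvP cnt.toNat).2.2.2.1 + (pvP cnt.toNat).2.2.2.2 + 1) 1000000007,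
            (pvP cnt.toNat).1, (pvP cnt.toNat).2.1, (pvP cnt.toNat).2.2.1, (pvP cnt.toNat).2.2.2.1) = pvP (cnt + 1).toNat by rw [hn, pvP_succ]]
      exact ih ans num (cnt + 1) (by omega)
    · simp only [List.foldl_cons, pvStepA, pvStepB, hc, if_neg, Bool.false_eq_true, not_false_iff]
      rw [show ((1 : Int), (0 : Int), (0 : Int)) = pvT (1 : Int).toNat from pvT_one.symm,
          show ((1 : Int), (0 : Int), (0 : Int), (0 : Int), (0 : Int)) = pvP (1 : Int).toNat from pvP_one.symm]
      rw [ih _ c 1 le_rfl]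
      simp [pvF3_eq, pvF5_eq]

-- ===== VERDICT (by name: the statement is the Claim_ definition above) =====
theorem calculate_possible_strings_spec : Claim_equal_calculate_possible_strings := by
  intro s _
  unfold Spec_calculate_possible_strings calculate_possible_strings calculate_possible_strings_alt
  rw [show ((1 : Int), '_', ((1 : Int), (0 : Int), (0 : Int)), ((1 : Int), (0 : Int), (0 : Int), (0 : Int), (0 : Int)))
        = ((1 : Int), '_', pvT (1 : Int).toNat, pvP (1 : Int).toNat) by decide]
  exact (pv_loop_agree _ 1 '_' 1 le_rfl).symm
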